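-- pv_equiv track=rewrite | github.com/jcowdells/TheBear | src/util.py | find_string_size
-- ===== SOURCE A (Python) =====
-- def find_string_size(string):
--     lines = string.split("\n")
--     max_height = len(lines)
--     max_width = 0
--     for line in lines:
--         len_line = len(line)
--         if len_line > max_width:
--             max_width = len_line
--     return max_width, max_height
-- ===== SOURCE B (Python) =====
-- def find_string_size(string):
--     max_width = 0
--     current = 0
--     for ch in string:
--         if ch == "\n":
--             current = 0
--         else:
--             current += 1
--             if current > max_width:
--                 max_width = current
--     return max_width, string.count("\n") + 1
-- ===== Notes on version B (the rewrite author's own statement) =====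
-- stated objective: alternative
-- what changed: B makes a single character pass keeping a running current-line length and running maximum, and obtains the height as the newline count plus one, instead of building the list of lines with split and then scanning it for the longest.
import Mathlib
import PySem

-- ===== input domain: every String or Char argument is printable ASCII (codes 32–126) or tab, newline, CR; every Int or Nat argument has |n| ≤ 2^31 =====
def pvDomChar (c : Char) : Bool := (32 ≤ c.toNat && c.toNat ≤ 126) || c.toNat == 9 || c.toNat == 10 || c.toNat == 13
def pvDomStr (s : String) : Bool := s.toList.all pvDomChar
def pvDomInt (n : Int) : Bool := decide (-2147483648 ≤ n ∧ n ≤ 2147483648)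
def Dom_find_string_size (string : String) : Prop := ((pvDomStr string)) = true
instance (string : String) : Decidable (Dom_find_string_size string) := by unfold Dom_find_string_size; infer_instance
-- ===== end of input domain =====

-- B replaces split + scan-for-max by one character pass with a running line length; height = count('\n') + 1.

-- ===== PORT A =====
def find_string_size (string : String) : Int × Int :=
  let lines := PySem.Chars.splitOn string.toList ['\n']
  let max_height : Int := lines.length
  let max_width : Int := lines.foldl (fun max_width line =>
    let len_line : Int := line.length
    if len_line > max_width then len_line else max_width) 0
  (max_width, max_height)

-- ===== PORT B =====
def find_string_size_alt (string : String) : Int × Int :=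
  let st := string.toList.foldl (fun (st : Int × Int) ch =>
    if ch = '\n' then (st.1, 0)
    else
      let current := st.2 + 1
      ((if current > st.1 then current else st.1), current)) (0, 0)
  (st.1, (PySem.Str.count string "\n" : Int) + 1)

-- ===== PRECONDITION & SPEC =====
def Spec_find_string_size (string : String) (out : Int × Int) : Prop := out = find_string_size_alt string
instance (string : String) (out : Int × Int) : Decidable (Spec_find_string_size string out) := by unfold Spec_find_string_size; infer_instance

-- ===== CLAIM (what is proved, stated in full; the proofs are below) =====
def Claim_equal_find_string_size : Prop := ∀ (string : String), Dom_find_string_size string → Spec_find_string_size string (find_string_size string)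

-- ===== LEMMAS AND PROOFS =====

/-- Simple structural model of `split` on the single character '\n'. -/
def splitNl : List Char → List (List Char)
  | [] => [[]]
  | c :: rest =>
    if c = '\n' then [] :: splitNl rest
    else
      match splitNl rest with
      | [] => [[c]]
      | h :: t => (c :: h) :: t

lemma splitNl_ne_nil (l : List Char) : splitNl l ≠ [] := by
  cases l with
  | nil => simp [splitNl]
  | cons c rest =>
    simp only [splitNl]
    split
    · simp
    · cases splitNl rest <;> simp

lemma splitOn_go_eq (l : List Char) : ∀ (fuel : Nat), l.length ≤ fuel →
    ∀ (cur : List Char) (acc : List (List Char)),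
    PySem.Chars.splitOn.go ['\n'] fuel l cur acc
      = acc.reverse ++ (splitNl l).modifyHead (cur.reverse ++ ·) := by
  induction l with
  | nil =>
    intro fuel _ cur acc
    cases fuel <;> simp [PySem.Chars.splitOn.go, splitNl]
  | cons c rest ih =>
    intro fuel hf cur acc
    cases fuel with
    | zero => simp at hf
    | succ f =>
      rw [PySem.Chars.splitOn.go]
      by_cases hc : c = '\n'
      · subst hc
        simp only [List.isPrefixOf, BEq.rfl, Bool.true_and, List.isPrefixOf_nil_left, if_true,
          List.length_cons, List.length_nil, List.drop_succ_cons, List.drop_zero,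
          List.length_cons] at *
        rw [ih f (by omega) [] (cur.reverse :: acc)]
        simp [splitNl]
        cases splitNl rest <;> simp
      · have hpre : List.isPrefixOf ['\n'] (c :: rest) = false := by
          simp [List.isPrefixOf]; exact fun h => (hc h.symm).elim
        simp only [hpre, Bool.false_eq_true, if_false]
        rw [ih f (by simpa using Nat.le_of_succ_le_succ hf) (c :: cur) acc]
        simp only [splitNl, hc, if_false]
        obtain ⟨h, t, hht⟩ : ∃ h t, splitNl rest = h :: t := by
          cases hsn : splitNl rest with
          | nil => exact absurd hsn (splitNl_ne_nil rest)
          | cons h t => exact ⟨h, t, rfl⟩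
        rw [hht]
        simp

lemma splitOn_eq (l : List Char) : PySem.Chars.splitOn l ['\n'] = splitNl l := by
  rw [PySem.Chars.splitOn, splitOn_go_eq l (l.length + 1) (by omega) [] []]
  cases hsn : splitNl l with
  | nil => exact absurd hsn (splitNl_ne_nil l)
  | cons h t => simp

lemma count_go_eq (l : List Char) : ∀ (fuel : Nat), l.length ≤ fuel → ∀ (acc : Nat),
    PySem.Chars.count.go ['\n'] fuel l acc = acc + l.count '\n' := by
  induction l with
  | nil => intro fuel _ acc; cases fuel <;> simp [PySem.Chars.count.go]
  | cons c rest ih =>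
    intro fuel hf acc
    cases fuel with
    | zero => simp at hf
    | succ f =>
      rw [PySem.Chars.count.go]
      by_cases hc : c = '\n'
      · subst hc
        simp only [List.isPrefixOf, BEq.rfl, Bool.true_and, List.isPrefixOf_nil_left, if_true,
          List.length_cons, List.length_nil, List.drop_succ_cons, List.drop_zero]
        rw [ih f (by simpa using Nat.le_of_succ_le_succ hf) (acc + 1)]
        simp [List.count_cons]
        omega
      · have hpre : List.isPrefixOf ['\n'] (c :: rest) = false := by
          simp [List.isPrefixOf]; exact fun h => (hc h.symm).elim
        simp only [hpre, Bool.false_eq_true, if_false]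
        rw [ih f (by simpa using Nat.le_of_succ_le_succ hf) acc]
        simp [List.count_cons, hc]

lemma count_eq_count (l : List Char) : PySem.Chars.count l ['\n'] = l.count '\n' := by
  rw [PySem.Chars.count]
  simp only [List.isEmpty_cons, Bool.false_eq_true, if_false]
  rw [count_go_eq l l.length (le_refl _) 0]
  omega

lemma splitNl_length (l : List Char) :
    (splitNl l).length = l.count '\n' + 1 := by
  induction l with
  | nil => simp [splitNl]
  | cons c rest ih =>
    simp only [splitNl]
    by_cases hc : c = '\n'
    · subst hc; simp [List.count_cons, ih]
    · simp only [hc, if_false]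
      obtain ⟨h, t, hht⟩ : ∃ h t, splitNl rest = h :: t := by
        cases hsn : splitNl rest with
        | nil => exact absurd hsn (splitNl_ne_nil rest)
        | cons h t => exact ⟨h, t, rfl⟩
      rw [hht]
      simp [List.count_cons, hc]
      rw [hht] at ih
      simpa using ih

/-- Lengths of the lines, with the current (first) line already `cur` long. -/
def lens (cur : Int) : List Char → List Int
  | [] => [cur]
  | c :: rest => if c = '\n' then cur :: lens 0 rest else lens (cur + 1) rest

lemma lens_eq_map (l : List Char) : ∀ (cur : Int), ∃ h t, splitNl l = h :: t ∧
    lens cur l = (cur + (h.length : Int)) :: t.map (fun x => (x.length : Int)) := by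
  induction l with
  | nil => intro cur; exact ⟨[], [], rfl, by simp [lens]⟩
  | cons c rest ih =>
    intro cur
    by_cases hc : c = '\n'
    · subst hc
      obtain ⟨h, t, h1, h2⟩ := ih 0
      refine ⟨[], splitNl rest, by simp [splitNl], ?_⟩
      simp [lens, h1, h2]
    · obtain ⟨h, t, h1, h2⟩ := ih (cur + 1)
      refine ⟨c :: h, t, by simp [splitNl, hc, h1], ?_⟩
      simp only [lens, hc, if_false, h2, List.length_cons]
      congr 1
      push_cast
      ring

lemma lens_head_ge (l : List Char) : ∀ (cur : Int), ∃ h t, lens cur l = h :: t ∧ cur ≤ h := by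
  induction l with
  | nil => intro cur; exact ⟨cur, [], rfl, le_refl _⟩
  | cons c rest ih =>
    intro cur
    by_cases hc : c = '\n'
    · subst hc; exact ⟨cur, lens 0 rest, by simp [lens], le_refl _⟩
    · obtain ⟨h, t, h1, h2⟩ := ih (cur + 1)
      exact ⟨h, t, by simp [lens, hc, h1], by omega⟩

def bstep (st : Int × Int) (ch : Char) : Int × Int :=
  if ch = '\n' then (st.1, 0)
  else ((if st.2 + 1 > st.1 then st.2 + 1 else st.1), st.2 + 1)

lemma bfold_eq (l : List Char) : ∀ (mw cur : Int), 0 ≤ cur → cur ≤ mw →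
    (l.foldl bstep (mw, cur)).1 = (lens cur l).foldl max mw := by
  induction l with
  | nil =>
    intro mw cur _ h2
    simp [lens]
    omega
  | cons c rest ih =>
    intro mw cur h1 h2
    by_cases hc : c = '\n'
    · subst hc
      rw [List.foldl_cons, show bstep (mw, cur) '\n' = (mw, 0) from by simp [bstep]]
      rw [ih mw 0 (le_refl _) (by omega)]
      have hl : lens cur ('\n' :: rest) = cur :: lens 0 rest := by
        simp [lens]
      rw [hl, List.foldl_cons, max_eq_left h2]
    · rw [List.foldl_cons,
        show bstep (mw, cur) c = ((if cur + 1 > mw then cur + 1 else mw), cur + 1) from by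
          simp [bstep, hc]]
      have hmax : (if cur + 1 > mw then cur + 1 else mw) = max mw (cur + 1) := by
        split_ifs <;> omega
      rw [hmax, ih (max mw (cur + 1)) (cur + 1) (by omega) (by omega)]
      simp only [lens, hc, if_false]
      obtain ⟨h, t, hht, hge⟩ := lens_head_ge rest (cur + 1)
      rw [hht]
      simp only [List.foldl_cons]
      congr 1
      rw [max_assoc, max_eq_right hge]

lemma afold_eq_max (lines : List (List Char)) :
    lines.foldl (fun max_width line =>
      let len_line : Int := line.length
      if len_line > max_width then len_line else max_width) 0
    = (lines.map (fun x => (x.length : Int))).foldl max 0 := by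
  rw [List.foldl_map]
  have hfun : (fun (max_width : Int) (line : List Char) =>
      let len_line : Int := line.length
      if len_line > max_width then len_line else max_width)
      = (fun (x : Int) (y : List Char) => max x (y.length : Int)) := by
    funext m line
    simp only []
    split_ifs <;> omega
  rw [hfun]

-- ===== VERDICT (by name: the statement is the Claim_ definition above) =====
theorem find_string_size_spec : Claim_equal_find_string_size := by
  intro s _
  unfold Spec_find_string_size find_string_size find_string_size_alt
  simp only [splitOn_eq]
  rw [show (fun (st : Int × Int) ch =>
    if ch = '\n' then (st.1, 0)
    else
      let current := st.2 + 1
      ((if current > st.1 then current else st.1), current)) = bstep from rfl]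
  have hcount : PySem.Str.count s "\n" = s.toList.count '\n' := by
    have : PySem.Str.count s "\n" = PySem.Chars.count s.toList "\n".toList := by
      simp [PySem.Str.count]
    rw [this]
    have : ("\n" : String).toList = ['\n'] := rfl
    rw [this, count_eq_count]
  refine Prod.ext ?_ ?_
  · -- widths agree
    rw [afold_eq_max]
    obtain ⟨h, t, h1, h2⟩ := lens_eq_map s.toList 0
    have hmap : (splitNl s.toList).map (fun x => (x.length : Int)) = lens 0 s.toList := by
      rw [h1, h2]
      simp
    rw [hmap, ← bfold_eq s.toList 0 0 (le_refl _) (le_refl _)]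
  · -- heights agree
    rw [hcount, splitNl_length s.toList]
    push_cast
    ring
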